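-- pv_equiv track=rewrite | github.com/qwerpoiuqqq/j2lab-platform | reference/quantum-campaign/backend/app/services/campaign_registration.py | _mask_place_name
-- ===== SOURCE A (Python) =====
-- def _mask_place_name(name: str) -> str:
--     """상호명 2글자마다 X로 마스킹.
--
--     예: "일류곱창 마포공덕본점" → "일X곱X 마X공X본X"
--     """
--     if not name:
--         return name
--     result = []
--     char_count = 0
--     for char in name:
--         if char == ' ':
--             result.append(char)
--         else:
--             char_count += 1
--             if char_count % 2 == 0:
--                 result.append('X')
--             else:
--                 result.append(char)
--     return ''.join(result)
-- ===== SOURCE B (Python) =====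
-- def _mask_place_name(name: str) -> str:
--     """Mask every second non-space character with 'X' (three-phase: extract, mask by position, re-merge)."""
--     if not name:
--         return name
--     compact = [c for c in name if c != ' ']
--     masked = ['X' if i % 2 == 1 else c for i, c in enumerate(compact)]
--     it = iter(masked)
--     return ''.join(ch if ch == ' ' else next(it) for ch in name)
-- ===== Notes on version B (the rewrite author's own statement) =====
-- stated objective: alternative
-- what changed: Replaces A's single counting loop with a three-phase pipeline: extract the non-space chars, mask odd 0-based positions, then re-merge the masked chars back into the spaces of the original string.
import Mathlib
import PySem

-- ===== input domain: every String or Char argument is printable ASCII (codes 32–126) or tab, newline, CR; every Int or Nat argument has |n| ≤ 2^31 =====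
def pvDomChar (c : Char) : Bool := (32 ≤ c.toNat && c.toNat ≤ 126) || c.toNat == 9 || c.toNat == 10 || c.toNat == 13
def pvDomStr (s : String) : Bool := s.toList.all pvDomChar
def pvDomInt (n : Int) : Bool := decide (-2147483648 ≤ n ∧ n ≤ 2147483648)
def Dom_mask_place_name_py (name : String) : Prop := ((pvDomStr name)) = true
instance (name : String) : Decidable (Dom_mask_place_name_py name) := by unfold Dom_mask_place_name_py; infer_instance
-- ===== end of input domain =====

-- B re-implements A's counting loop as extract → positional mask → re-merge; same values, no speed claim.

-- ===== PORT A =====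
-- A's for-loop over the chars, carrying char_count and emitting the result chars in order
def maskLoopA : List Char → Nat → List Char
  | [], _ => []
  | c :: cs, charCount =>
    if c = ' ' then c :: maskLoopA cs charCount
    else (if (charCount + 1) % 2 == 0 then 'X' else c) :: maskLoopA cs (charCount + 1)

def mask_place_name_py (name : String) : String :=
  if name = "" then name
  else String.ofList (maskLoopA name.toList 0)

-- ===== PORT B =====
-- re-merge phase: spaces pass through, other positions consume the next masked char (next(it))
def mergeB : List Char → List Char → List Char
  | [], _ => []
  | c :: cs, ms =>
    if c = ' ' then c :: mergeB cs ms
    else match ms with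
      | m :: ms' => m :: mergeB cs ms'
      | [] => []   -- unreachable: masked has one char per non-space char of name

def mask_place_name_py_alt (name : String) : String :=
  if name = "" then name
  else
    let compact := name.toList.filter (fun c => ¬ (c = ' '))
    let masked := (PySem.List.enumerate compact 0).map
      (fun p => if PySem.Int.mod p.1 2 == 1 then 'X' else p.2)
    String.ofList (mergeB name.toList masked)

-- ===== PRECONDITION & SPEC =====
def Spec_mask_place_name_py (name : String) (out : String) : Prop := out = mask_place_name_py_alt name
instance (name : String) (out : String) : Decidable (Spec_mask_place_name_py name out) := by unfold Spec_mask_place_name_py; infer_instance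

-- ===== CLAIM (what is proved, stated in full; the proofs are below) =====
def Claim_equal_mask_place_name_py : Prop := ∀ (name : String), Dom_mask_place_name_py name → Spec_mask_place_name_py name (mask_place_name_py name)

-- ===== LEMMAS AND PROOFS =====

-- the mask phase, indexed from an arbitrary global position k (proof-side reformulation)
def maskFrom (k : Nat) : List Char → List Char
  | [] => []
  | c :: l => (if k % 2 == 1 then 'X' else c) :: maskFrom (k + 1) l

theorem map_enumerate_eq_maskFrom (l : List Char) (k : Nat) :
    (PySem.List.enumerate l (k : Int)).map
      (fun p => if PySem.Int.mod p.1 2 == 1 then 'X' else p.2) = maskFrom k l := by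
  induction l generalizing k with
  | nil => simp [PySem.List.enumerate_nil, maskFrom]
  | cons c cs ih =>
    rw [PySem.List.enumerate_cons]
    have : ((k : Int) + 1) = ((k + 1 : Nat) : Int) := by push_cast; ring
    simp only [List.map_cons, maskFrom, this, ih]
    have hmod : PySem.Int.mod (k : Int) 2 = ((k % 2 : Nat) : Int) := by
      exact_mod_cast PySem.Int.mod_natCast k 2
    congr 1
    rw [hmod]
    rcases Nat.mod_two_eq_zero_or_one k with h | h <;> simp [h]

theorem mergeB_maskFrom_eq_loopA (cs : List Char) (k : Nat) :
    mergeB cs (maskFrom k (cs.filter (fun c => !decide (c = ' ')))) = maskLoopA cs k := by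
  induction cs generalizing k with
  | nil => rfl
  | cons c cs ih =>
    by_cases hc : c = ' '
    · simp [mergeB, maskLoopA, hc]
      exact ih k
    · have hpar : ((k + 1) % 2 == 0) = (k % 2 == 1) := by
        rcases Nat.mod_two_eq_zero_or_one k with h | h <;>
          simp [Nat.add_mod, h]
      simp [mergeB, maskLoopA, maskFrom, hc, hpar]
      exact ih (k + 1)

-- ===== VERDICT (by name: the statement is the Claim_ definition above) =====
theorem mask_place_name_py_spec : Claim_equal_mask_place_name_py := by
  intro name _
  unfold Spec_mask_place_name_py mask_place_name_py mask_place_name_py_alt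
  by_cases h : name = ""
  · simp [h]
  · simp only [h, decide_not]
    have := map_enumerate_eq_maskFrom (name.toList.filter (fun c => !decide (c = ' '))) 0
    simp only [Nat.cast_zero] at this
    rw [this, mergeB_maskFrom_eq_loopA]
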